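-- pv_equiv track=rewrite | github.com/logicmoo/ARC_study | src/utilities.py | redraw_in_scale
-- ===== SOURCE A (Python) =====
-- def redraw_in_scale(shape, scale):
--     """ Takes a shape and redraws it in a different bigger scale.
--     The positions are offseted but the colors are preserved.
--
--     For simplicity the algorithm first rescales Ys then Xs.
--     Each rescale uses anchor to calculate the position of new/old cells.
--     The further away we are from the anchor the bigger the offset needs to be
--     since we already added (scale-1) number of extra cells up to that point.
--
--     The algorithm is new_pos = pos + (scale-1) * (pos - anchor) + 0:scale
--
--     >>> redraw_in_scale([(0, 0, 5), (0, 1, 9)], 2)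
--     [(0, 0, 5), (0, 1, 5), (1, 0, 5), (1, 1, 5), (0, 2, 9), (0, 3, 9), (1, 2, 9), (1, 3, 9)]
--     """
--
--     temp_new_shape = []
--
--     # For simplicity first rescale Ys
--     anchor_y, _, _ = min(shape, key=lambda c: c[0])  # anchor for Y - used for progressive scaling
--     for cell in shape:
--         y, x, colour = cell
--
--         for s in range(scale):
--             new_y = y + (scale - 1) * (y - anchor_y) + s  # rescale algorithm
--             temp_new_shape.append((new_y, x, colour))
--
--     new_shape = []
--
--     # Then rescale Xs
--     _, anchor_x, _ = min(temp_new_shape, key=lambda c: c[1])  # anchor for X - used for progressive scaling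
--     for cell in temp_new_shape:
--         y, x, colour = cell
--
--         for s in range(scale):
--             new_x = x + (scale - 1) * (x - anchor_x) + s  # rescale algorithm
--             new_shape.append((y, new_x, colour))
--
--     return new_shape
-- ===== SOURCE B (Python) =====
-- def redraw_in_scale(shape, scale):
--     """Single fused pass: both anchors are computed once from the input
--     (the y-pass never changes x, so min-x over the intermediate list equals
--     min-x over shape), then each cell is expanded into its scale*scale block
--     directly, without building the intermediate list."""
--     anchor_y = min(c[0] for c in shape)
--     anchor_x = min(c[1] for c in shape)
--     new_shape = []
--     for y, x, colour in shape:
--         base_y = scale * y - (scale - 1) * anchor_y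
--         base_x = scale * x - (scale - 1) * anchor_x
--         for sy in range(scale):
--             for sx in range(scale):
--                 new_shape.append((base_y + sy, base_x + sx, colour))
--     return new_shape
-- ===== Notes on version B (the rewrite author's own statement) =====
-- stated objective: simpler
-- what changed: A's two sequential rescale passes through an intermediate list are fused into one pass: both anchors are taken from the input once and each cell is expanded directly into its scale x scale block, so the intermediate list disappears.
import Mathlib
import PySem

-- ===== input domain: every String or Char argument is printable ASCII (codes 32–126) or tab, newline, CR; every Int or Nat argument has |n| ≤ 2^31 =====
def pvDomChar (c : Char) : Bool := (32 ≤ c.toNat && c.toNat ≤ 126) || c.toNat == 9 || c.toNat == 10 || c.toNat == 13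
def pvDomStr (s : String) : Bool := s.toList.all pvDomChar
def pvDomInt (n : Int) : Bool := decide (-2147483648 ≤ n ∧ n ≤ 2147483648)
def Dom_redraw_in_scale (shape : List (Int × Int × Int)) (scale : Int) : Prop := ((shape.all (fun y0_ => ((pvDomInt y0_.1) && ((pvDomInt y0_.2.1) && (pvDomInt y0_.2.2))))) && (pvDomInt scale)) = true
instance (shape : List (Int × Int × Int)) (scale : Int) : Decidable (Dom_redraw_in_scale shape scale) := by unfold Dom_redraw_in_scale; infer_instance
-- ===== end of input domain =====

-- B fuses A's two rescale passes (intermediate list) into one direct nested pass; same output, no intermediate list.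


-- ===== PORT A =====
-- literal transliteration of A: first rescale Ys into temp_new_shape, then rescale Xs.
-- min() of an empty list raises ValueError in Python; the `match … | none` arms are
-- unreachable under Pre_ and return [] arbitrarily.
def redraw_in_scale (shape : List (Int × Int × Int)) (scale : Int) : List (Int × Int × Int) :=
  match PySem.List.min? shape (fun c => c.1) with
  | none => []
  | some a =>
    let anchor_y := a.1
    let temp_new_shape := shape.foldl (fun acc cell =>
      (PySem.List.pyRange 0 scale 1).foldl (fun acc2 s =>
        acc2 ++ [(cell.1 + (scale - 1) * (cell.1 - anchor_y) + s, cell.2.1, cell.2.2)]) acc) []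
    match PySem.List.min? temp_new_shape (fun c => c.2.1) with
    | none => []
    | some b =>
      let anchor_x := b.2.1
      temp_new_shape.foldl (fun acc cell =>
        (PySem.List.pyRange 0 scale 1).foldl (fun acc2 s =>
          acc2 ++ [(cell.1, cell.2.1 + (scale - 1) * (cell.2.1 - anchor_x) + s, cell.2.2)]) acc) []

-- ===== PORT B =====
-- literal transliteration of B (Source B): both anchors from the input, one fused nested loop.
def redraw_in_scale_alt (shape : List (Int × Int × Int)) (scale : Int) : List (Int × Int × Int) :=
  match PySem.List.min? (shape.map (fun c => c.1)) (fun v => v),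
        PySem.List.min? (shape.map (fun c => c.2.1)) (fun v => v) with
  | some anchor_y, some anchor_x =>
    shape.foldl (fun acc cell =>
      let base_y := scale * cell.1 - (scale - 1) * anchor_y
      let base_x := scale * cell.2.1 - (scale - 1) * anchor_x
      (PySem.List.pyRange 0 scale 1).foldl (fun acc2 sy =>
        (PySem.List.pyRange 0 scale 1).foldl (fun acc3 sx =>
          acc3 ++ [(base_y + sy, base_x + sx, cell.2.2)]) acc2) acc) []
  | _, _ => []

-- ===== PRECONDITION & SPEC =====
-- Pre_ excludes exactly the inputs on which A raises ValueError: empty shape (first min()),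
-- and scale ≤ 0 with nonempty shape (the intermediate list is empty, second min() raises).
def Pre_redraw_in_scale (shape : List (Int × Int × Int)) (scale : Int) : Prop :=
  shape ≠ [] ∧ 1 ≤ scale
instance (shape : List (Int × Int × Int)) (scale : Int) : Decidable (Pre_redraw_in_scale shape scale) := by unfold Pre_redraw_in_scale; infer_instance
def pvWitness_redraw_in_scale : (List (Int × Int × Int)) × Int := ([(0, 0, 5), (0, 1, 9)], 2)

def Spec_redraw_in_scale (shape : List (Int × Int × Int)) (scale : Int) (out : List (Int × Int × Int)) : Prop := out = redraw_in_scale_alt shape scale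
instance (shape : List (Int × Int × Int)) (scale : Int) (out : List (Int × Int × Int)) : Decidable (Spec_redraw_in_scale shape scale out) := by unfold Spec_redraw_in_scale; infer_instance

-- ===== CLAIM (what is proved, stated in full; the proofs are below) =====
def Claim_equal_redraw_in_scale : Prop := ∀ (shape : List (Int × Int × Int)) (scale : Int), Dom_redraw_in_scale shape scale → Pre_redraw_in_scale shape scale → Spec_redraw_in_scale shape scale (redraw_in_scale shape scale)


-- ===== LEMMAS AND PROOFS =====

-- the key value of min?-by-key equals min?-with-id over the mapped list
lemma min_map_key {a0 k0 : Type} [LinearOrder k0] (xs : List a0) (f : a0 → k0) (a : a0) (v : k0)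
    (ha : PySem.List.min? xs f = some a) (hv : PySem.List.min? (xs.map f) (fun u => u) = some v) :
    v = f a := by
  have hmem : a ∈ xs := PySem.List.min?_mem ha
  have hvmem : v ∈ xs.map f := PySem.List.min?_mem hv
  have hamin := PySem.List.min?_isMin ha
  have hvmin := PySem.List.min?_isMin hv
  apply le_antisymm
  · exact hvmin (f a) (List.mem_map_of_mem hmem)
  · obtain ⟨b, hb, rfl⟩ := List.mem_map.mp hvmem
    exact hamin b hb

-- one Python append-pass 'for cell in l: for s in r: out.append(g cell s)' is a flatMap
lemma pass_eq {a0 b0 : Type} (l : List a0) (r : List Int) (g : a0 → Int → b0) :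
    l.foldl (fun acc cell => r.foldl (fun acc2 s => acc2 ++ [g cell s]) acc) []
      = l.flatMap (fun cell => r.map (g cell)) := by
  have h : l.foldl (fun acc cell => r.foldl (fun acc2 s => acc2 ++ [g cell s]) acc) []
      = l.foldl (fun acc cell => acc ++ r.map (g cell)) [] := by
    apply List.foldl_ext
    intro acc cell _
    exact PySem.List.foldl_append_singleton_eq_map _ _ _
  rw [h, PySem.List.foldl_append_eq_flatMap]
  simp

-- B's fused triple loop is a flatMap of flatMaps
lemma pass2_eq {a0 b0 : Type} (l : List a0) (r : List Int) (g : a0 → Int → Int → b0) :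
    l.foldl (fun acc cell => r.foldl (fun acc2 sy =>
        r.foldl (fun acc3 sx => acc3 ++ [g cell sy sx]) acc2) acc) []
      = l.flatMap (fun cell => r.flatMap (fun sy => r.map (g cell sy))) := by
  have h : l.foldl (fun acc cell => r.foldl (fun acc2 sy =>
        r.foldl (fun acc3 sx => acc3 ++ [g cell sy sx]) acc2) acc) []
      = l.foldl (fun acc cell => acc ++ r.flatMap (fun sy => r.map (g cell sy))) [] := by
    apply List.foldl_ext
    intro acc cell _
    have h2 : r.foldl (fun acc2 sy => r.foldl (fun acc3 sx => acc3 ++ [g cell sy sx]) acc2) acc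
        = r.foldl (fun acc2 sy => acc2 ++ r.map (g cell sy)) acc := by
      apply List.foldl_ext
      intro acc2 sy _
      exact PySem.List.foldl_append_singleton_eq_map _ _ _
    rw [h2, PySem.List.foldl_append_eq_flatMap]
  rw [h, PySem.List.foldl_append_eq_flatMap]
  simp

-- ===== VERDICT (by name: the statement is the Claim_ definition above) =====
theorem redraw_in_scale_spec : Claim_equal_redraw_in_scale := by
  intro shape scale _ hpre
  obtain ⟨hne, hsc⟩ := hpre
  unfold Spec_redraw_in_scale redraw_in_scale redraw_in_scale_alt
  obtain ⟨a, ha⟩ : ∃ a, PySem.List.min? shape (fun c => c.1) = some a := by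
    rcases h : PySem.List.min? shape (fun c => c.1) with _ | a
    · exact absurd ((PySem.List.min?_eq_none_iff shape _).mp h) hne
    · exact ⟨a, rfl⟩
  obtain ⟨ay, hay⟩ : ∃ v, PySem.List.min? (shape.map (fun c => c.1)) (fun u => u) = some v := by
    rcases h : PySem.List.min? (shape.map (fun c => c.1)) (fun u => u) with _ | v
    · exact absurd (List.map_eq_nil_iff.mp ((PySem.List.min?_eq_none_iff _ _).mp h)) hne
    · exact ⟨v, h⟩
  obtain ⟨ax, hax⟩ : ∃ v, PySem.List.min? (shape.map (fun c => c.2.1)) (fun u => u) = some v := by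
    rcases h : PySem.List.min? (shape.map (fun c => c.2.1)) (fun u => u) with _ | v
    · exact absurd (List.map_eq_nil_iff.mp ((PySem.List.min?_eq_none_iff _ _).mp h)) hne
    · exact ⟨v, h⟩
  have hay' : ay = a.1 := min_map_key shape (fun c => c.1) a ay ha hay
  rw [ha, hay, hax]
  dsimp only
  rw [pass_eq shape (PySem.List.pyRange 0 scale 1)
        (fun cell s => (cell.1 + (scale - 1) * (cell.1 - a.1) + s, cell.2.1, cell.2.2))]
  set temp := shape.flatMap (fun cell =>
      (PySem.List.pyRange 0 scale 1).map
        (fun s => (cell.1 + (scale - 1) * (cell.1 - a.1) + s, cell.2.1, cell.2.2))) with htempdef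
  have hzero_mem : (0:Int) ∈ PySem.List.pyRange 0 scale 1 :=
    PySem.List.mem_pyRange_one.mpr ⟨le_refl 0, by omega⟩
  have htemp_ne : temp ≠ [] := by
    rcases List.exists_mem_of_ne_nil shape hne with ⟨c, hc⟩
    intro h
    have h' := List.flatMap_eq_nil_iff.mp h c hc
    have := List.map_eq_nil_iff.mp h'
    rw [this] at hzero_mem
    exact absurd hzero_mem (List.not_mem_nil)
  obtain ⟨b, hb⟩ : ∃ b, PySem.List.min? temp (fun c => c.2.1) = some b := by
    rcases h : PySem.List.min? temp (fun c => c.2.1) with _ | b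
    · exact absurd ((PySem.List.min?_eq_none_iff temp _).mp h) htemp_ne
    · exact ⟨b, rfl⟩
  rw [hb]
  dsimp only
  -- the x-anchor of temp equals the x-anchor of shape
  have hxmem : ∀ v : Int, (∃ c, c ∈ temp ∧ c.2.1 = v) ↔ (∃ c, c ∈ shape ∧ c.2.1 = v) := by
    intro v
    constructor
    · rintro ⟨c, hc, rfl⟩
      rcases List.mem_flatMap.mp hc with ⟨d, hd, hcd⟩
      rcases List.mem_map.mp hcd with ⟨s, _, rfl⟩
      exact ⟨d, hd, rfl⟩
    · rintro ⟨c, hc, rfl⟩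
      refine ⟨(c.1 + (scale - 1) * (c.1 - a.1) + 0, c.2.1, c.2.2), ?_, rfl⟩
      exact List.mem_flatMap.mpr ⟨c, hc, List.mem_map.mpr ⟨0, hzero_mem, rfl⟩⟩
  have hbx : b.2.1 = ax := by
    have hbmem : b ∈ temp := PySem.List.min?_mem hb
    have hbmin := PySem.List.min?_isMin hb
    have haxmem : ax ∈ shape.map (fun c => c.2.1) := PySem.List.min?_mem hax
    have haxmin := PySem.List.min?_isMin hax
    apply le_antisymm
    · rcases List.mem_map.mp haxmem with ⟨c, hc, rfl⟩
      rcases (hxmem c.2.1).mpr ⟨c, hc, rfl⟩ with ⟨c', hc', he⟩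
      calc b.2.1 ≤ c'.2.1 := hbmin c' hc'
        _ = c.2.1 := he
    · rcases (hxmem b.2.1).mp ⟨b, hbmem, rfl⟩ with ⟨c, hc, he⟩
      calc ax ≤ c.2.1 := haxmin c.2.1 (List.mem_map_of_mem hc)
        _ = b.2.1 := he
  rw [pass_eq temp (PySem.List.pyRange 0 scale 1)
        (fun cell s => (cell.1, cell.2.1 + (scale - 1) * (cell.2.1 - b.2.1) + s, cell.2.2)),
      pass2_eq shape (PySem.List.pyRange 0 scale 1)
        (fun cell sy sx => (scale * cell.1 - (scale - 1) * ay + sy,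
                            scale * cell.2.1 - (scale - 1) * ax + sx, cell.2.2)),
      htempdef]
  simp only [List.flatMap_assoc, List.flatMap_map]
  subst hay' hbx
  congr 1
  funext cell
  congr 1
  funext sy
  congr 1
  funext sx
  simp only [Prod.mk.injEq]
  exact ⟨by ring, by ring, trivial⟩
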